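-- pv_equiv track=rewrite | github.com/saharc2000/NLP_Construct-State_Classifier | Vectors.py | make_vector18
-- ===== SOURCE A (Python) =====
-- def find_dict_in_shift_from_smixut(sentence, shift, smixut):
--     i=0
--     punctuation = r"\"#$%&'()*+,-–./:;<=>?@[\]^_`{|}~"
--     for word_dict in sentence:
--         if (smixut in word_dict.get("word")) and (0 < i+shift < len(sentence)):
--             if(sentence[i+shift].get("word") in punctuation):
--                 if(shift > 0):
--                     return find_dict_in_shift_from_smixut(sentence, shift+1, smixut)
--                 else:
--                     return find_dict_in_shift_from_smixut(sentence, shift-1, smixut)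
--             else:
--                 return sentence[i+shift]
--         i+=1
--     return "err"
--
-- def make_vector18(smixut_list, unique_lex_words, sentences):
--     #create list of vectors
--     vectors_type18 = []
--     i = 0
--     for smixut in smixut_list:
--         word1, word2 = smixut.split(' ', 1)
--         # find_token_info()
--         if (i >= len(sentences)):
--             break
--         vector = [0] * len(unique_lex_words)
--         word_before = find_dict_in_shift_from_smixut(sentences[i], -1, word1)
--         word_before2 = find_dict_in_shift_from_smixut(sentences[i], -2, word1)
--         if ((word_before != "err")):
--             vector[unique_lex_words[word_before.get("lex")]] = 1
--         if ((word_before2 != "err")):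
--             vector[unique_lex_words[word_before2.get("lex")]] = 1
--         vectors_type18.append(vector)
--         i+=1
--     return vectors_type18
-- ===== SOURCE B (Python) =====
-- def make_vector18(smixut_list, unique_lex_words, sentences):
--     punctuation = r"\"#$%&'()*+,-–./:;<=>?@[\]^_`{|}~"
--     vectors = []
--     for smixut, sentence in zip(smixut_list, sentences):
--         word1 = smixut.split(' ', 1)[0]
--         n = len(sentence)
--         vector = [0] * len(unique_lex_words)
--         for shift0 in (-1, -2):
--             shift = shift0
--             found = None
--             while True:
--                 idx = next((i for i, d in enumerate(sentence)
--                             if word1 in d.get("word") and 0 < i + shift < n), None)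
--                 if idx is None:
--                     break
--                 cand = sentence[idx + shift]
--                 if cand.get("word") in punctuation:
--                     shift += 1 if shift > 0 else -1
--                 else:
--                     found = cand
--                     break
--             if found is not None:
--                 vector[unique_lex_words[found.get("lex")]] = 1
--         vectors.append(vector)
--     return vectors
-- ===== Notes on version B (the rewrite author's own statement) =====
-- stated objective: alternative
-- what changed: The recursive shift-search helper is replaced by an iterative while-loop that maintains the current shift and finds the first qualifying word via a single find-first scan, and the counter-with-break outer loop is replaced by a zip over (smixut, sentence) pairs with the two shifts handled by a fold.
import Mathlib
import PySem

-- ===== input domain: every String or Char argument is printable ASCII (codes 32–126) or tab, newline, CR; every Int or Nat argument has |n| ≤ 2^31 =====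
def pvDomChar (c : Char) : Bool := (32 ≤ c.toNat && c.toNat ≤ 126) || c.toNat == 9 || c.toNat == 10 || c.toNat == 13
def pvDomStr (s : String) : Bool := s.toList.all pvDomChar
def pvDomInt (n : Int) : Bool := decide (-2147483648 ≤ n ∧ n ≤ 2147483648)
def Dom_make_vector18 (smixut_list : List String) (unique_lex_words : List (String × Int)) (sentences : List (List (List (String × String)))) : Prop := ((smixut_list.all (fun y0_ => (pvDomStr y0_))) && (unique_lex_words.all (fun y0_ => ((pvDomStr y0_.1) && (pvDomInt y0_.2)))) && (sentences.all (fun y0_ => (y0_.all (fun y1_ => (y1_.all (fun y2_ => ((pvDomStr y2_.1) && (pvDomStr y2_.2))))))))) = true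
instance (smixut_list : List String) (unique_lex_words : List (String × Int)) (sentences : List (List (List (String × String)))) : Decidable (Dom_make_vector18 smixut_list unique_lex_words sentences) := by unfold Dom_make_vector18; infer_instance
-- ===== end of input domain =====

-- B rewrites the recursive shift-search helper as an iterative find-first loop and the
-- counter-and-break outer loop as a zip; objective: alternative decomposition, same cost.
-- NOTE: the equivalence is about the RETURN value; neither program mutates its arguments.

-- shared: word_dict.get(k) (first-match association-list lookup, the Python dict lookup)
def pvGet (d : List (String × String)) (k : String) : Option String :=
  PySem.Dict.get? (PySem.Dict.mk d) k

-- the punctuation string of the Python source (raw string; contains an en dash)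
def pvPunct : String := "\\\"#$%&'()*+,-–./:;<=>?@[\\]^_`{|}~"

-- ===== PORT A =====
-- A's inner for-loop with early return: scan the sentence with a running index i,
-- returning the first i whose word matches and whose shifted index is in bounds
def pvScanA (sentence : List (List (String × String))) (shift : Int) (smixut : String) :
    List (List (String × String)) → Int → Option Int
  | [], _ => none
  | d :: rest, i =>
    if PySem.Str.isIn smixut ((pvGet d "word").getD "") &&
       decide (0 < i + shift) && decide (i + shift < PySem.List.len sentence)
    then some i
    else pvScanA sentence shift smixut rest (i + 1)

-- A's find_dict_in_shift_from_smixut; none = "err"; fuel bounds the recursion depth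
-- (|shift| grows each call, so sentence.length + 1 fuel is never exhausted on real calls)
def pvFindA (fuel : Nat) (sentence : List (List (String × String))) (shift : Int) (smixut : String) :
    Option (List (String × String)) :=
  match fuel with
  | 0 => none
  | fuel + 1 =>
    match pvScanA sentence shift smixut sentence 0 with
    | none => none
    | some i =>
      let c := (PySem.List.pyGet? sentence (i + shift)).getD []
      if PySem.Str.isIn ((pvGet c "word").getD "") pvPunct then
        if shift > 0 then pvFindA fuel sentence (shift + 1) smixut
        else pvFindA fuel sentence (shift - 1) smixut
      else some c

-- A's outer loop: counter i, break when i ≥ len(sentences)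
def pvOuterA (unique_lex_words : List (String × Int)) (sentences : List (List (List (String × String)))) :
    List String → Nat → List (List Int)
  | [], _ => []
  | smixut :: rest, i =>
    let word1 := ((PySem.Str.splitMax? smixut " " 1).getD []).headD ""
    if sentences.length ≤ i then []
    else
      let sentence := (PySem.List.pyGet? sentences (i : Int)).getD []
      let vector := List.replicate unique_lex_words.length (0 : Int)
      let wb := pvFindA (sentence.length + 1) sentence (-1) word1
      let wb2 := pvFindA (sentence.length + 1) sentence (-2) word1
      let vector := match wb with
        | none => vector
        | some d => PySem.List.pySetD vector (PySem.Dict.getD (PySem.Dict.mk unique_lex_words) ((pvGet d "lex").getD "") 0) 1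
      let vector := match wb2 with
        | none => vector
        | some d => PySem.List.pySetD vector (PySem.Dict.getD (PySem.Dict.mk unique_lex_words) ((pvGet d "lex").getD "") 0) 1
      vector :: pvOuterA unique_lex_words sentences rest (i + 1)

def make_vector18 (smixut_list : List String) (unique_lex_words : List (String × Int)) (sentences : List (List (List (String × String)))) : List (List Int) :=
  pvOuterA unique_lex_words sentences smixut_list 0

-- ===== PORT B =====
-- B's next(...): index of the first qualifying word, via find? over enumerate
def pvFirstIdxB (sentence : List (List (String × String))) (shift : Int) (word1 : String) : Option Int :=
  ((PySem.List.enumerate sentence 0).find?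
    (fun p => PySem.Str.isIn word1 ((pvGet p.2 "word").getD "") &&
              decide (0 < p.1 + shift) && decide (p.1 + shift < PySem.List.len sentence))).map (·.1)

-- B's while loop: adjust shift until the shifted word is not punctuation (fuel = loop bound)
def pvFindB (fuel : Nat) (sentence : List (List (String × String))) (shift : Int) (word1 : String) :
    Option (List (String × String)) :=
  match fuel with
  | 0 => none
  | fuel + 1 =>
    match pvFirstIdxB sentence shift word1 with
    | none => none
    | some i =>
      let cand := (PySem.List.pyGet? sentence (i + shift)).getD []
      if PySem.Str.isIn ((pvGet cand "word").getD "") pvPunct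
      then pvFindB fuel sentence (if shift > 0 then shift + 1 else shift - 1) word1
      else some cand

def make_vector18_alt (smixut_list : List String) (unique_lex_words : List (String × Int)) (sentences : List (List (List (String × String)))) : List (List Int) :=
  (smixut_list.zip sentences).map (fun p =>
    let word1 := ((PySem.Str.splitMax? p.1 " " 1).getD []).headD ""
    ([(-1 : Int), -2]).foldl (fun vector shift0 =>
        match pvFindB (p.2.length + 1) p.2 shift0 word1 with
        | none => vector
        | some d => PySem.List.pySetD vector (PySem.Dict.getD (PySem.Dict.mk unique_lex_words) ((pvGet d "lex").getD "") 0) 1)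
      (List.replicate unique_lex_words.length (0 : Int)))

-- ===== PRECONDITION & SPEC =====
-- one word_dict the Python can use without raising: has a "word", and a "lex" that is a key
-- of unique_lex_words whose value is a valid (possibly negative) Python index into the vector
def pvOkDict (unique_lex_words : List (String × Int)) (d : List (String × String)) : Bool :=
  (pvGet d "word").isSome &&
  (match pvGet d "lex" with
   | none => false
   | some k =>
     match PySem.Dict.get? (PySem.Dict.mk unique_lex_words) k with
     | none => false
     | some v => decide (-(unique_lex_words.length : Int) ≤ v) && decide (v < (unique_lex_words.length : Int)))

-- Pre_ excludes exactly the inputs where A raises: a processed construct-state without a space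
-- (ValueError on unpacking), a word_dict missing "word" (TypeError on 'in None') or whose "lex"
-- is absent from unique_lex_words or maps outside the vector (KeyError/IndexError).
def Pre_make_vector18 (smixut_list : List String) (unique_lex_words : List (String × Int)) (sentences : List (List (List (String × String)))) : Prop :=
  (((smixut_list.zip sentences).all (fun p =>
      PySem.Str.isIn " " p.1 && p.2.all (pvOkDict unique_lex_words)) &&
    (decide (smixut_list.length ≤ sentences.length) ||
     PySem.Str.isIn " " (smixut_list.getD sentences.length ""))) = true)
instance (smixut_list : List String) (unique_lex_words : List (String × Int)) (sentences : List (List (List (String × String)))) : Decidable (Pre_make_vector18 smixut_list unique_lex_words sentences) := by unfold Pre_make_vector18; infer_instance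

def pvWitness_make_vector18 : List String × (List (String × Int)) × (List (List (List (String × String)))) :=
  (["a b"], [("l", 0)], [[[("word", "a"), ("lex", "l")]]])

def Spec_make_vector18 (smixut_list : List String) (unique_lex_words : List (String × Int)) (sentences : List (List (List (String × String)))) (out : List (List Int)) : Prop := out = make_vector18_alt smixut_list unique_lex_words sentences
instance (smixut_list : List String) (unique_lex_words : List (String × Int)) (sentences : List (List (List (String × String)))) (out : List (List Int)) : Decidable (Spec_make_vector18 smixut_list unique_lex_words sentences out) := by unfold Spec_make_vector18; infer_instance

-- ===== CLAIM (what is proved, stated in full; the proofs are below) =====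
def Claim_equal_make_vector18 : Prop := ∀ (smixut_list : List String) (unique_lex_words : List (String × Int)) (sentences : List (List (List (String × String)))), Dom_make_vector18 smixut_list unique_lex_words sentences → Pre_make_vector18 smixut_list unique_lex_words sentences → Spec_make_vector18 smixut_list unique_lex_words sentences (make_vector18 smixut_list unique_lex_words sentences)

-- ===== LEMMAS AND PROOFS =====

theorem pvScan_eq_firstIdx (sentence : List (List (String × String))) (shift : Int) (w : String) :
    ∀ (l : List (List (String × String))) (j : Int),
      pvScanA sentence shift w l j =
      ((PySem.List.enumerate l j).find?
        (fun p => PySem.Str.isIn w ((pvGet p.2 "word").getD "") &&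
                  decide (0 < p.1 + shift) && decide (p.1 + shift < PySem.List.len sentence))).map (·.1) := by
  intro l
  induction l with
  | nil => intro j; simp [pvScanA, PySem.List.enumerate_nil]
  | cons d rest ih =>
    intro j
    simp only [pvScanA, PySem.List.enumerate_cons]
    cases h : (PySem.Str.isIn w ((pvGet d "word").getD "") &&
        decide (0 < j + shift) && decide (j + shift < PySem.List.len sentence)) with
    | true =>
      rw [List.find?_cons_of_pos (by exact h)]; simp
    | false =>
      rw [List.find?_cons]
      rw [h]
      exact ih (j + 1)

theorem pvFind_eq (fuel : Nat) (sentence : List (List (String × String))) (w : String) :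
    ∀ shift, pvFindA fuel sentence shift w = pvFindB fuel sentence shift w := by
  induction fuel with
  | zero => intro _; rfl
  | succ fuel ih =>
    intro shift
    show pvFindA (fuel + 1) sentence shift w = pvFindB (fuel + 1) sentence shift w
    rw [pvFindA, pvFindB, pvFirstIdxB, ← pvScan_eq_firstIdx]
    cases pvScanA sentence shift w sentence 0 with
    | none => rfl
    | some i =>
      simp only []
      split_ifs with hp hs
      · rw [ih]
      · rw [ih]
      · rfl

theorem pvOuter_eq (ulw : List (String × Int)) (sents : List (List (List (String × String)))) :
    ∀ (sl : List String) (i : Nat),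
      pvOuterA ulw sents sl i =
      (sl.zip (sents.drop i)).map (fun p =>
        let word1 := ((PySem.Str.splitMax? p.1 " " 1).getD []).headD ""
        ([(-1 : Int), -2]).foldl (fun vector shift0 =>
            match pvFindB (p.2.length + 1) p.2 shift0 word1 with
            | none => vector
            | some d => PySem.List.pySetD vector (PySem.Dict.getD (PySem.Dict.mk ulw) ((pvGet d "lex").getD "") 0) 1)
          (List.replicate ulw.length (0 : Int))) := by
  intro sl
  induction sl with
  | nil => intro i; simp [pvOuterA]
  | cons smixut rest ih =>
    intro i
    by_cases h : sents.length ≤ i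
    · rw [pvOuterA, if_pos h, List.drop_eq_nil_of_le h]
      simp
    · have h' : i < sents.length := Nat.lt_of_not_le h
      rw [pvOuterA, if_neg (by omega)]
      have hd : sents.drop i = sents[i] :: sents.drop (i + 1) :=
        (List.drop_eq_getElem_cons h')
      rw [hd, List.zip_cons_cons, List.map_cons, ih]
      have hget : (PySem.List.pyGet? sents (i : Int)).getD [] = sents[i] := by
        rw [PySem.List.pyGet?_natCast, List.getElem?_eq_getElem h']; rfl
      simp only [hget, List.foldl, pvFind_eq]

-- ===== VERDICT (by name: the statement is the Claim_ definition above) =====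
theorem make_vector18_spec : Claim_equal_make_vector18 := by
  intro sl ulw sents _ _
  show make_vector18 sl ulw sents = make_vector18_alt sl ulw sents
  rw [make_vector18, make_vector18_alt, pvOuter_eq]
  rfl
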